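-- pv_equiv track=rewrite | github.com/wyk18703232953/myResearch | codeComplex/data/filteredData/python/np/python_np_0411.py | check
-- ===== SOURCE A (Python) =====
-- from collections import defaultdict
--
-- def check(mid, m, a):
--     d = defaultdict(int)
--     for idx, row in enumerate(a):
--         string = ''
--         for val in row:
--             if val >= mid:
--                 string += '1'
--             else:
--                 string += '0'
--         d[int(string, 2)] = idx
--     full = (1 << m) - 1
--     for i in d.keys():
--         for j in d.keys():
--             if i | j == full:
--                 return [d[i], d[j]]
--     return []
-- ===== SOURCE B (Python) =====
-- def check(mid, m, a):
--     # mask per row computed arithmetically; pair search via a per-bit inverted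
--     # index of keys and progressive candidate intersection (no pairwise ORs).
--     d = {}
--     for idx, row in enumerate(a):
--         mask = 0
--         for val in row:
--             mask = mask * 2 + (1 if val >= mid else 0)
--         d[mask] = idx
--     if not d:
--         return []
--     if m > max(len(row) for row in a):
--         return []
--     full = (1 << m) - 1
--     keys = list(d)
--     has = [{key for key in keys if (key >> b) & 1} for b in range(m)]
--     base = [key for key in keys if key & ~full == 0]
--     for i in base:
--         cand = base
--         c = full ^ i
--         for b, hb in enumerate(has):
--             if (c >> b) & 1:
--                 cand = [key for key in cand if key in hb]
--         if cand:
--             return [d[i], d[cand[0]]]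
--     return []
-- ===== Notes on version B (the rewrite author's own statement) =====
-- stated objective: alternative
-- what changed: B computes each row mask arithmetically instead of building a binary string and re-parsing it, returns [] immediately when m exceeds every row length (no mask can then reach the all-ones value), and replaces A's O(k^2) all-pairs OR scan over distinct masks with a per-bit inverted index of keys that is intersected over the complement bits of each candidate mask.
import Mathlib
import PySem

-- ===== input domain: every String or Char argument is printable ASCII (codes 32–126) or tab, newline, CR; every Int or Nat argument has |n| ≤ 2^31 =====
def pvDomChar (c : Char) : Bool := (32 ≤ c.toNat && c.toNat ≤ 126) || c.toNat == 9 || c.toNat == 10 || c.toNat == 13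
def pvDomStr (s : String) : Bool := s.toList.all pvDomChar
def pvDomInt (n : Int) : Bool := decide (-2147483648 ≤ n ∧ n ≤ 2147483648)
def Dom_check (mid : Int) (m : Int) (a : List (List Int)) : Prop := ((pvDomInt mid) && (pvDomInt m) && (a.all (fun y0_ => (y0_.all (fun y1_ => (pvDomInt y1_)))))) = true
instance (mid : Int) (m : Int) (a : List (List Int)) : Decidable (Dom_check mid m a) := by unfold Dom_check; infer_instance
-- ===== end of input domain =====

-- B replaces A's binary-string building + all-pairs OR scan by arithmetic masks,
-- an early [] when m exceeds every row length, and a per-bit inverted index of keys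
-- intersected over the complement bits (objective: alternative; return value only).

-- ===== PORT A =====

-- int(s, 2) ported by hand: exact for the '0'/'1' strings A builds; none = ValueError on ''
def pvBin? (s : List Char) : Option Int :=
  if s = [] then none
  else some (s.foldl (fun acc c => acc * 2 + (if c = '1' then 1 else 0)) 0)

-- string built char by char as in A
def pvRowStr (mid : Int) (row : List Int) : List Char :=
  row.foldl (fun s v => s ++ [if mid ≤ v then '1' else '0']) []

-- d[int(string,2)] = idx over enumerate(a); Pre_ excludes the empty-row none case (getD 0 unreachable under Pre_)
def pvBuildA (mid : Int) (a : List (List Int)) : PySem.Dict Int Int :=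
  (PySem.List.enumerate a 0).foldl
    (fun d p => d.insert ((pvBin? (pvRowStr mid p.2)).getD 0) p.1) PySem.Dict.empty

-- the nested 'for i in d.keys(): for j in d.keys(): if i|j==full: return …'
def pvOuterA (d : PySem.Dict Int Int) (full : Int) (keys : List Int) : List Int → List Int
  | [] => []
  | i :: rest =>
      match keys.find? (fun j => (Int.lor i j) == full) with
      | some j => [d.getD i 0, d.getD j 0]
      | none => pvOuterA d full keys rest

def check (mid : Int) (m : Int) (a : List (List Int)) : List Int :=
  let d := pvBuildA mid a
  let full : Int := 2 ^ m.toNat - 1   -- (1 << m) - 1; Pre_ gives 0 ≤ m (negative shift raises)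
  pvOuterA d full d.keys d.keys

-- ===== PORT B =====

-- mask = mask*2 + (1 if val >= mid else 0)
def pvMask (mid : Int) (row : List Int) : Int :=
  row.foldl (fun acc v => acc * 2 + (if mid ≤ v then 1 else 0)) 0

def pvBuildB (mid : Int) (a : List (List Int)) : PySem.Dict Int Int :=
  (PySem.List.enumerate a 0).foldl (fun d p => d.insert (pvMask mid p.2) p.1) PySem.Dict.empty

-- has = [{key for key in keys if (key >> b) & 1} for b in range(m)]  (b ≥ 0, so >> b is >>> b.toNat)
def pvHas (keys : List Int) (mm : Nat) : List (PySem.Set Int) :=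
  (List.range mm).map (fun b => PySem.Set.ofList (keys.filter (fun key => (Int.land (Int.shiftRight key b) 1) == 1)))

-- for b, hb in enumerate(has): if (c >> b) & 1: cand = [key for key in cand if key in hb]
def pvNarrow (base : List Int) (c : Int) (has : List (PySem.Set Int)) : List Int :=
  (PySem.List.enumerate has 0).foldl
    (fun cand p => if (Int.land (Int.shiftRight c p.1.toNat) 1) == 1 then cand.filter (fun key => PySem.Set.contains p.2 key) else cand)
    base

-- for i in base: … if cand: return [d[i], d[cand[0]]]
def pvOuterB (d : PySem.Dict Int Int) (full : Int) (has : List (PySem.Set Int)) (base : List Int) : List Int → List Int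
  | [] => []
  | i :: rest =>
      match pvNarrow base (Int.xor full i) has with
      | [] => pvOuterB d full has base rest
      | j :: _ => [d.getD i 0, d.getD j 0]

def check_alt (mid : Int) (m : Int) (a : List (List Int)) : List Int :=
  let d := pvBuildB mid a
  if d.size == 0 then []
  else if m > (PySem.List.max? (a.map (fun row => (row.length : Int))) (fun x => x)).getD 0 then []
       -- max(len(row) for row in a); a ≠ [] here, so max? is some and getD 0 is exact
  else
    let full : Int := 2 ^ m.toNat - 1   -- (1 << m) - 1; Pre_ gives 0 ≤ m
    let keys := d.keys
    let has := pvHas keys m.toNat       -- range(m); exact since 0 ≤ m under Pre_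
    let base := keys.filter (fun key => (Int.land key (Int.not full)) == 0)
    pvOuterB d full has base base

-- ===== PRECONDITION & SPEC =====
-- Pre_ excludes exactly the inputs where A raises: m < 0 ((1 << m) raises ValueError)
-- and any empty row (int('', 2) raises ValueError).
def Pre_check (mid : Int) (m : Int) (a : List (List Int)) : Prop :=
  0 ≤ m ∧ ∀ row ∈ a, row ≠ ([] : List Int)
instance (mid : Int) (m : Int) (a : List (List Int)) : Decidable (Pre_check mid m a) := by
  unfold Pre_check; infer_instance

def pvWitness_check : Int × Int × List (List Int) := (1, 2, [[1, 2], [0, 0]])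

def Spec_check (mid : Int) (m : Int) (a : List (List Int)) (out : List Int) : Prop := out = check_alt mid m a
instance (mid : Int) (m : Int) (a : List (List Int)) (out : List Int) : Decidable (Spec_check mid m a out) := by unfold Spec_check; infer_instance

-- ===== CLAIM (what is proved, stated in full; the proofs are below) =====
def Claim_equal_check : Prop := ∀ (mid : Int) (m : Int) (a : List (List Int)), Dom_check mid m a → Pre_check mid m a → Spec_check mid m a (check mid m a)
-- ===== LEMMAS AND PROOFS =====

-- ---- Int/Nat bridges for Python's bitwise operators (all rfl on ofNat) ----
theorem pvLor_ofNat (x y : Nat) : Int.lor (Int.ofNat x) (Int.ofNat y) = Int.ofNat (x ||| y) := rfl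
theorem pvLandNot_ofNat (x y : Nat) : Int.land (Int.ofNat x) (Int.not (Int.ofNat y)) = Int.ofNat (x.ldiff y) := rfl
theorem pvXor_ofNat (x y : Nat) : Int.xor (Int.ofNat x) (Int.ofNat y) = Int.ofNat (x ^^^ y) := rfl
theorem pvShift_ofNat (x b : Nat) : Int.land (Int.shiftRight (Int.ofNat x) b) 1 = Int.ofNat ((x >>> b) &&& 1) := rfl

theorem pvBit_iff (x b : Nat) :
    ((Int.land (Int.shiftRight (Int.ofNat x) b) 1 == 1) = true) ↔ x.testBit b := by
  rw [pvShift_ofNat]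
  have h1 : ((Int.ofNat ((x >>> b) &&& 1) == 1) = true) ↔ ((x >>> b) &&& 1 = 1) := by
    simp only [beq_iff_eq, Int.ofNat_eq_natCast, Nat.cast_eq_one]
  rw [h1, Nat.and_one_is_mod, Nat.shiftRight_eq_div_pow, Nat.testBit_eq_decide_div_mod_eq]
  simp

theorem pvSub_iff (x y : Nat) :
    ((Int.land (Int.ofNat x) (Int.not (Int.ofNat y)) == 0) = true) ↔ x.ldiff y = 0 := by
  rw [pvLandNot_ofNat]; simp

theorem pvLor_iff (x y f : Nat) :
    ((Int.lor (Int.ofNat x) (Int.ofNat y) == Int.ofNat f) = true) ↔ x ||| y = f := by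
  rw [pvLor_ofNat]; simp

theorem pvFull_eq (mm : Nat) : ((2 : Int) ^ mm - 1) = Int.ofNat (2 ^ mm - 1) := by
  have h : (1 : Nat) ≤ 2 ^ mm := Nat.one_le_two_pow
  rw [Int.ofNat_eq_natCast]
  push_cast [Nat.cast_sub h]
  ring

-- ---- ldiff basics ----
theorem pvLdiff_zero_iff (x y : Nat) : x.ldiff y = 0 ↔ ∀ b, x.testBit b → y.testBit b := by
  constructor
  · intro h b hb
    have := congrArg (fun z => z.testBit b) h
    simp [Nat.testBit_ldiff, hb] at this
    exact this
  · intro h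
    apply Nat.eq_of_testBit_eq
    intro b
    simp [Nat.testBit_ldiff]
    intro hb
    exact h b hb

-- ---- the core bitwise characterisation: i|j == full vs complement-superset ----
theorem pvCore (ni nj mm : Nat) (hi : ni.ldiff (2 ^ mm - 1) = 0) :
    (ni ||| nj = 2 ^ mm - 1) ↔
      (nj.ldiff (2 ^ mm - 1) = 0 ∧ ∀ b < mm, ((2 ^ mm - 1) ^^^ ni).testBit b → nj.testBit b) := by
  have hibit := (pvLdiff_zero_iff _ _).mp hi
  constructor
  · intro h
    constructor
    · rw [pvLdiff_zero_iff]
      intro b hb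
      have : (ni ||| nj).testBit b = true := by simp [hb]
      rw [h] at this
      exact this
    · intro b hb hc
      rw [Nat.testBit_xor, Nat.testBit_two_pow_sub_one] at hc
      simp [hb] at hc
      have : (ni ||| nj).testBit b = true := by rw [h, Nat.testBit_two_pow_sub_one]; simp [hb]
      rw [Nat.testBit_lor, hc] at this
      simpa using this
  · rintro ⟨hj, hcomp⟩
    have hjbit := (pvLdiff_zero_iff _ _).mp hj
    apply Nat.eq_of_testBit_eq
    intro b
    rw [Nat.testBit_lor, Nat.testBit_two_pow_sub_one]
    by_cases hb : b < mm
    · simp only [hb, decide_true]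
      by_cases hni : ni.testBit b
      · simp [hni]
      · have : ((2 ^ mm - 1) ^^^ ni).testBit b = true := by
          rw [Nat.testBit_xor, Nat.testBit_two_pow_sub_one]
          simp [hb, hni]
        simp [hni, hcomp b hb this]
    · simp only [hb, decide_false]
      have h1 : ni.testBit b = false := by
        by_contra hc
        have := hibit b (by simpa using hc)
        rw [Nat.testBit_two_pow_sub_one] at this
        simp [hb] at this
      have h2 : nj.testBit b = false := by
        by_contra hc
        have := hjbit b (by simpa using hc)
        rw [Nat.testBit_two_pow_sub_one] at this
        simp [hb] at this
      simp [h1, h2]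

-- ---- the two mask computations agree ----
theorem pvFoldAppend (mid : Int) (row : List Int) (init : List Char) :
    row.foldl (fun s v => s ++ [if mid ≤ v then '1' else '0']) init
      = init ++ row.map (fun v => if mid ≤ v then '1' else '0') := by
  induction row generalizing init with
  | nil => simp
  | cons v r ih => simp [ih]

theorem pvMask_eq (mid : Int) (row : List Int) :
    (pvBin? (pvRowStr mid row)).getD 0 = pvMask mid row := by
  unfold pvRowStr pvBin? pvMask
  rw [pvFoldAppend, List.nil_append]
  cases row with
  | nil => simp
  | cons v r =>
    rw [if_neg (by simp)]
    rw [Option.getD_some, List.foldl_map]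
    congr 1
    funext acc w
    by_cases hw : mid ≤ w <;> simp [hw]

theorem pvBuild_eq (mid : Int) (a : List (List Int)) : pvBuildA mid a = pvBuildB mid a := by
  unfold pvBuildA pvBuildB
  congr 1
  funext d p
  rw [pvMask_eq]

theorem pvKeys_eq (mid : Int) (a : List (List Int)) :
    (pvBuildB mid a).keys = PySem.Set.ofList (a.map (pvMask mid)) := by
  unfold pvBuildB
  rw [PySem.Dict.keys_foldl_insert_key (PySem.List.enumerate a 0)
        (fun p => pvMask mid p.2) (fun _ p => p.1) PySem.Dict.empty]
  have h1 : (PySem.Dict.empty : PySem.Dict Int Int).keys = [] := rfl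
  rw [h1, PySem.Set.update_nil_left]
  congr 1
  rw [show (List.map (pvMask mid) a) = List.map (pvMask mid) (List.map (fun x => x.2) (PySem.List.enumerate a 0)) by rw [PySem.List.map_snd_enumerate]]
  rw [List.map_map]
  rfl

-- ---- masks are nonnegative and bounded by 2^(row length) ----
theorem pvMaskAux (mid : Int) (row : List Int) (acc : Nat) :
    ∃ nk : Nat, row.foldl (fun acc v => acc * 2 + (if mid ≤ v then 1 else 0)) (Int.ofNat acc) = Int.ofNat nk
      ∧ nk < (acc + 1) * 2 ^ row.length := by
  induction row generalizing acc with
  | nil => exact ⟨acc, rfl, by simp⟩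
  | cons v r ih =>
    have hstep : (Int.ofNat acc * 2 + (if mid ≤ v then 1 else 0) : Int)
        = Int.ofNat (acc * 2 + (if mid ≤ v then 1 else 0)) := by
      by_cases hv : mid ≤ v <;> simp [hv, Int.ofNat_eq_natCast]
    obtain ⟨nk, h1, h2⟩ := ih (acc * 2 + (if mid ≤ v then 1 else 0))
    refine ⟨nk, ?_, ?_⟩
    · rw [List.foldl_cons, hstep, h1]
    · have hb : (if mid ≤ v then 1 else 0) ≤ 1 := by split_ifs <;> omega
      calc nk < (acc * 2 + (if mid ≤ v then 1 else 0) + 1) * 2 ^ r.length := h2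
        _ ≤ ((acc + 1) * 2) * 2 ^ r.length := by
              apply Nat.mul_le_mul_right; omega
        _ = (acc + 1) * 2 ^ (v :: r).length := by
              rw [List.length_cons, Nat.pow_succ]; ring

theorem pvMask_bound (mid : Int) (row : List Int) :
    ∃ nk : Nat, pvMask mid row = Int.ofNat nk ∧ nk < 2 ^ row.length := by
  obtain ⟨nk, h1, h2⟩ := pvMaskAux mid row 0
  exact ⟨nk, h1, by simpa using h2⟩

-- ---- generic: a left fold of conditional filters is one filter ----
theorem pvFoldFilter {α β : Type} (L : List β) (P : β → Bool) (Q : β → α → Bool) (init : List α) :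
    L.foldl (fun cand p => if P p then cand.filter (Q p) else cand) init
      = init.filter (fun j => L.all (fun p => !P p || Q p j)) := by
  induction L generalizing init with
  | nil => simp
  | cons p L ih =>
    simp only [List.foldl_cons, List.all_cons]
    by_cases h : P p
    · rw [if_pos h, ih, List.filter_filter]
      apply List.filter_congr
      intro x _
      simp [h, Bool.and_comm]
    · rw [if_neg h, ih]
      apply List.filter_congr
      intro x _
      simp [Bool.not_eq_true] at h
      simp [h]

theorem pvHas_length (keys : List Int) (mm : Nat) : (pvHas keys mm).length = mm := by
  simp [pvHas]

theorem pvHas_get (keys : List Int) (mm b : Nat) (hb : b < mm) :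
    (pvHas keys mm)[b]'(by rw [pvHas_length]; exact hb)
      = PySem.Set.ofList (keys.filter (fun key => (Int.land (Int.shiftRight key b) 1) == 1)) := by
  simp [pvHas]

theorem pvElem_iff (keys : List Int) (mm : Nat) (nc nj b : Nat) (hb : b < mm) (hj : Int.ofNat nj ∈ keys) :
    ((!(Int.land (Int.shiftRight (Int.ofNat nc) b) 1 == 1)
        || PySem.Set.contains ((pvHas keys mm)[b]'(by rw [pvHas_length]; exact hb)) (Int.ofNat nj)) = true)
      ↔ (nc.testBit b → nj.testBit b) := by
  rw [pvHas_get keys mm b hb]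
  rw [Bool.or_eq_true, Bool.not_eq_true']
  rw [PySem.Set.contains_iff, PySem.Set.mem_ofList, List.mem_filter]
  constructor
  · intro hor hnc
    rcases hor with hcc | hcc
    · exact absurd ((pvBit_iff nc b).mpr hnc) (Bool.eq_false_iff.mp hcc)
    · exact (pvBit_iff nj b).mp hcc.2
  · intro h
    by_cases hcb : (Int.land (Int.shiftRight (Int.ofNat nc) b) 1 == 1) = true
    · exact Or.inr ⟨hj, (pvBit_iff nj b).mpr (h ((pvBit_iff nc b).mp hcb))⟩
    · exact Or.inl (Bool.eq_false_iff.mpr hcb)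

theorem pvAll_iff (keys : List Int) (mm : Nat) (nc nj : Nat) (hj : Int.ofNat nj ∈ keys) :
    ((PySem.List.enumerate (pvHas keys mm) 0).all
        (fun p => !(Int.land (Int.shiftRight (Int.ofNat nc) p.1.toNat) 1 == 1)
            || PySem.Set.contains p.2 (Int.ofNat nj)) = true)
      ↔ ∀ b < mm, nc.testBit b → nj.testBit b := by
  rw [List.all_eq_true]
  constructor
  · intro h b hb hcb
    have hmem : ((0 : Int) + (b : Nat), (pvHas keys mm)[b]'(by rw [pvHas_length]; exact hb))
        ∈ PySem.List.enumerate (pvHas keys mm) 0 := by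
      rw [PySem.List.mem_enumerate_iff]
      exact ⟨b, by rw [pvHas_length]; exact hb, rfl⟩
    have hx := h _ hmem
    have htn : ((0 : Int) + (b : Nat)).toNat = b := by omega
    simp only [htn] at hx
    exact (pvElem_iff keys mm nc nj b hb hj).mp hx hcb
  · intro h p hp
    rw [PySem.List.mem_enumerate_iff] at hp
    obtain ⟨b, hb, rfl⟩ := hp
    rw [pvHas_length] at hb
    have htn : ((0 : Int) + (b : Nat)).toNat = b := by omega
    simp only [htn]
    exact (pvElem_iff keys mm nc nj b hb hj).mpr (h b hb)

-- ---- the inner candidate narrowing computes exactly A's inner scan predicate ----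
theorem pvInner_eq (keys : List Int) (mm : Nat) (ni : Nat)
    (hnn : ∀ k ∈ keys, ∃ nk : Nat, k = Int.ofNat nk)
    (hsub : ni.ldiff (2 ^ mm - 1) = 0) :
    pvNarrow (keys.filter (fun k => (Int.land k (Int.not ((2:Int) ^ mm - 1))) == 0))
        (Int.xor ((2:Int) ^ mm - 1) (Int.ofNat ni)) (pvHas keys mm)
      = keys.filter (fun j => (Int.lor (Int.ofNat ni) j) == ((2:Int) ^ mm - 1)) := by
  unfold pvNarrow
  rw [pvFoldFilter (PySem.List.enumerate (pvHas keys mm) 0)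
        (fun p => (Int.land (Int.shiftRight (Int.xor ((2:Int) ^ mm - 1) (Int.ofNat ni)) p.1.toNat) 1 == 1))
        (fun p key => PySem.Set.contains p.2 key)]
  rw [List.filter_filter]
  apply List.filter_congr
  intro j hjk
  obtain ⟨nj, rfl⟩ := hnn j hjk
  have hc : (Int.xor ((2:Int) ^ mm - 1) (Int.ofNat ni)) = Int.ofNat ((2 ^ mm - 1) ^^^ ni) := by
    rw [pvFull_eq, pvXor_ofNat]
  rw [hc]
  rw [Bool.eq_iff_iff, Bool.and_eq_true]
  rw [pvAll_iff keys mm ((2 ^ mm - 1) ^^^ ni) nj hjk]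
  rw [pvFull_eq, pvSub_iff, pvLor_iff]
  rw [pvCore ni nj mm hsub]
  tauto

-- ---- if i has a bit outside full, A's inner scan finds nothing ----
theorem pvLdiff_of_lor (ni nj nf : Nat) (h : ni ||| nj = nf) : ni.ldiff nf = 0 := by
  rw [pvLdiff_zero_iff]
  intro b hb
  rw [← h, Nat.testBit_lor, hb]
  rfl

theorem pvFind_none (keys : List Int) (mm : Nat) (ni : Nat)
    (hnn : ∀ k ∈ keys, ∃ nk : Nat, k = Int.ofNat nk)
    (hsub : ¬ ni.ldiff (2 ^ mm - 1) = 0) :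
    keys.find? (fun j => (Int.lor (Int.ofNat ni) j) == ((2:Int) ^ mm - 1)) = none := by
  rw [List.find?_eq_none]
  intro j hj
  obtain ⟨nj, rfl⟩ := hnn j hj
  rw [pvFull_eq, pvLor_iff]
  intro h
  exact hsub (pvLdiff_of_lor ni nj _ h)

-- ---- the two pair-search loops agree ----
theorem pvOuter_eq (d : PySem.Dict Int Int) (mm : Nat) (keys : List Int)
    (hnn : ∀ k ∈ keys, ∃ nk : Nat, k = Int.ofNat nk) :
    ∀ l, (∀ i ∈ l, i ∈ keys) →
      pvOuterA d ((2:Int) ^ mm - 1) keys l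
        = pvOuterB d ((2:Int) ^ mm - 1) (pvHas keys mm)
            (keys.filter (fun k => (Int.land k (Int.not ((2:Int) ^ mm - 1))) == 0))
            (l.filter (fun k => (Int.land k (Int.not ((2:Int) ^ mm - 1))) == 0)) := by
  intro l
  induction l with
  | nil => intro _; rfl
  | cons i rest ih =>
    intro hl
    have hik : i ∈ keys := hl i List.mem_cons_self
    obtain ⟨ni, rfl⟩ := hnn i hik
    have hrest : ∀ x ∈ rest, x ∈ keys := fun x hx => hl x (List.mem_cons_of_mem _ hx)
    by_cases hs : ((Int.land (Int.ofNat ni) (Int.not ((2:Int) ^ mm - 1))) == 0) = true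
    · have hsub : ni.ldiff (2 ^ mm - 1) = 0 := by
        rw [pvFull_eq, pvSub_iff] at hs
        exact hs
      rw [List.filter_cons, if_pos hs]
      simp only [pvOuterA, pvOuterB]
      rw [pvInner_eq keys mm ni hnn hsub]
      rw [← List.head?_filter]
      cases hfil : keys.filter (fun j => (Int.lor (Int.ofNat ni) j) == ((2:Int) ^ mm - 1)) with
      | nil => simpa using ih hrest
      | cons j t => simp
    · rw [List.filter_cons, if_neg hs]
      simp only [pvOuterA]
      have hsub : ¬ ni.ldiff (2 ^ mm - 1) = 0 := by
        rw [pvFull_eq, pvSub_iff] at hs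
        exact hs
      rw [pvFind_none keys mm ni hnn hsub]
      exact ih hrest

-- ---- when m exceeds every row length A finds nothing either ----
theorem pvOuterA_nil (d : PySem.Dict Int Int) (mm L : Nat) (keys : List Int)
    (hL : L < mm)
    (hk : ∀ k ∈ keys, ∃ nk : Nat, k = Int.ofNat nk ∧ nk < 2 ^ L) :
    ∀ l, (∀ i ∈ l, i ∈ keys) → pvOuterA d ((2:Int) ^ mm - 1) keys l = [] := by
  intro l
  induction l with
  | nil => intro _; rfl
  | cons i rest ih =>
    intro hl
    obtain ⟨ni, rfl, hni⟩ := hk i (hl i List.mem_cons_self)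
    simp only [pvOuterA]
    have hfind : keys.find? (fun j => (Int.lor (Int.ofNat ni) j) == ((2:Int) ^ mm - 1)) = none := by
      rw [List.find?_eq_none]
      intro j hj
      obtain ⟨nj, rfl, hnj⟩ := hk j hj
      rw [pvFull_eq, pvLor_iff]
      intro h
      have hor : ni ||| nj < 2 ^ L := Nat.or_lt_two_pow hni hnj
      have h1 : 2 ^ L ≤ 2 ^ mm - 1 := by
        have h2 : 2 ^ (L + 1) ≤ 2 ^ mm := Nat.pow_le_pow_right (by norm_num) hL
        have h3 : 0 < 2 ^ L := Nat.two_pow_pos L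
        rw [Nat.pow_succ] at h2
        omega
      omega
    rw [hfind]
    exact ih (fun x hx => hl x (List.mem_cons_of_mem _ hx))

theorem pv_main : ∀ (mid m : Int) (a : List (List Int)), 0 ≤ m → check mid m a = check_alt mid m a := by
  intro mid m a hm
  have hA : check mid m a = pvOuterA (pvBuildB mid a) ((2:Int) ^ m.toNat - 1) (pvBuildB mid a).keys (pvBuildB mid a).keys := by
    show pvOuterA (pvBuildA mid a) ((2:Int) ^ m.toNat - 1) (pvBuildA mid a).keys (pvBuildA mid a).keys = _
    rw [pvBuild_eq]
  have hB : check_alt mid m a =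
      (if ((pvBuildB mid a).size == 0) = true then []
       else if m > (PySem.List.max? (a.map (fun row => (row.length : Int))) (fun x => x)).getD 0 then []
       else pvOuterB (pvBuildB mid a) ((2:Int) ^ m.toNat - 1) (pvHas (pvBuildB mid a).keys m.toNat)
              ((pvBuildB mid a).keys.filter (fun key => (Int.land key (Int.not ((2:Int) ^ m.toNat - 1))) == 0))
              ((pvBuildB mid a).keys.filter (fun key => (Int.land key (Int.not ((2:Int) ^ m.toNat - 1))) == 0))) := rfl
  rw [hA, hB]
  cases a with
  | nil => rfl
  | cons r a' =>
    set d := pvBuildB mid (r :: a') with hd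
    have hkeys := pvKeys_eq mid (r :: a')
    have hmem : ∀ k ∈ d.keys, ∃ row ∈ r :: a', pvMask mid row = k := by
      intro k hk
      rw [hd, hkeys, PySem.Set.mem_ofList] at hk
      exact List.mem_map.mp hk
    have hnn : ∀ k ∈ d.keys, ∃ nk : Nat, k = Int.ofNat nk := by
      intro k hk
      obtain ⟨row, _, hrow⟩ := hmem k hk
      obtain ⟨nk, hnk, _⟩ := pvMask_bound mid row
      exact ⟨nk, by rw [← hrow, hnk]⟩
    have hne : d.keys ≠ [] := by
      have : pvMask mid r ∈ d.keys := by
        rw [hkeys, PySem.Set.mem_ofList]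
        exact List.mem_map_of_mem (l := r :: a') List.mem_cons_self
      exact List.ne_nil_of_mem this
    have hsz : (d.size == 0) = false := by
      have h1 : d.size = d.keys.length := by
        simp [PySem.Dict.size, PySem.Dict.keys]
      have h2 : d.keys.length ≠ 0 := fun h => hne (List.length_eq_zero_iff.mp h)
      rw [h1, beq_eq_false_iff_ne]
      exact h2
    rw [hsz]
    simp only [Bool.false_eq_true, if_false]
    obtain ⟨mv, hmv⟩ : ∃ mv, PySem.List.max? ((r :: a').map (fun row => (row.length : Int))) (fun x => x) = some mv := by
      rw [List.map_cons, PySem.List.max?_id_cons]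
      exact ⟨_, rfl⟩
    rw [hmv, Option.getD_some]
    have hmax : ∀ row ∈ r :: a', (row.length : Int) ≤ mv := by
      intro row hrow
      exact PySem.List.max?_isMax hmv _ (List.mem_map_of_mem hrow)
    have hmv0 : 0 ≤ mv := by
      have := PySem.List.max?_mem hmv
      rw [List.mem_map] at this
      obtain ⟨row, _, hrow⟩ := this
      omega
    by_cases hgt : m > mv
    · rw [if_pos hgt]
      refine pvOuterA_nil d m.toNat mv.toNat d.keys (by omega) ?_ d.keys (fun i hi => hi)
      intro k hk
      obtain ⟨row, hrowa, hrow⟩ := hmem k hk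
      obtain ⟨nk, hnk, hbd⟩ := pvMask_bound mid row
      refine ⟨nk, by rw [← hrow, hnk], ?_⟩
      have hlen : row.length ≤ mv.toNat := by
        have := hmax row hrowa
        omega
      exact lt_of_lt_of_le hbd (Nat.pow_le_pow_right (by norm_num) hlen)
    · rw [if_neg hgt]
      apply pvOuter_eq d m.toNat d.keys hnn d.keys
      intro i hi; exact hi

-- ===== VERDICT (by name: the statement is the Claim_ definition above) =====
theorem check_spec : Claim_equal_check := by
  intro mid m a _ hpre
  exact pv_main mid m a hpre.1
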